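-- pv_equiv track=rewrite | github.com/merab235/Algorithme-2e-semestre | lab1/lab_6/src/task6.py | max_prizes
-- ===== SOURCE A (Python) =====
-- def max_prizes(n):
--     prizes = []
--     k = 0
--     total = 0
--     while total + (k + 1) <= n:
--         k += 1
--         prizes.append(k)
--         total += k
--     if total < n:
--         prizes[-1] += n - total
--     return k, prizes
-- ===== SOURCE B (Python) =====
-- def max_prizes(n):
--     if n < 1:
--         return 0, []
--     # binary search for the largest k with k*(k+1)//2 <= n
--     lo, hi = 0, n
--     while lo < hi:
--         mid = (lo + hi + 1) // 2
--         if mid * (mid + 1) // 2 <= n: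
--             lo = mid
--         else:
--             hi = mid - 1
--     k = lo
--     prizes = list(range(1, k + 1))
--     total = k * (k + 1) // 2
--     if total < n:
--         prizes[-1] += n - total
--     return k, prizes
-- ===== Notes on version B (the rewrite author's own statement) =====
-- stated objective: alternative
-- what changed: Replaces A's one-by-one accumulating loop (k iterations, k ~ sqrt(2n)) by a binary search for the largest k with k*(k+1)//2 <= n, then builds the prize list directly with range and applies the same final adjustment.
import Mathlib
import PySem

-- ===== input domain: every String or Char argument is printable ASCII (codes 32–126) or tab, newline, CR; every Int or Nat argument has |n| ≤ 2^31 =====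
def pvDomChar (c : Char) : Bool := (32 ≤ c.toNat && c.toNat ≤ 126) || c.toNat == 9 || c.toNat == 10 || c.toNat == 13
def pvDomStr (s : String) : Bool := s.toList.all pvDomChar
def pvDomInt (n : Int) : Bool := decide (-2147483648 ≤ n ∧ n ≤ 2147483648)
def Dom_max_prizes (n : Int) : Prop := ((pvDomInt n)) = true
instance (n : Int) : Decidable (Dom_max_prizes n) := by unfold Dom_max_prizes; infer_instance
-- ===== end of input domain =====

-- B finds the number of prizes by binary search on k*(k+1)//2 <= n instead of A's accumulating loop; objective: alternative.


-- ===== PORT A =====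
-- while total + (k+1) <= n: k += 1; prizes.append(k); total += k
def loopA (n : Int) (k : Nat) (total : Int) (prizes : List Int) : Nat × Int × List Int :=
  if total + ((k : Int) + 1) ≤ n then
    loopA n (k + 1) (total + ((k : Int) + 1)) (prizes ++ [(k : Int) + 1])
  else (k, total, prizes)
termination_by (n - total).toNat
decreasing_by omega

def max_prizes (n : Int) : Int × List Int :=
  let r := loopA n 0 0 []
  let k : Int := (r.1 : Int)
  let total := r.2.1
  let prizes := r.2.2
  let prizes :=
    if total < n then
      -- prizes[-1] += n - total  (prizes is nonempty whenever this branch runs)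
      match prizes.getLast? with
      | some a => prizes.dropLast ++ [a + (n - total)]
      | none => prizes
    else prizes
  (k, prizes)

-- ===== PORT B =====
-- while lo < hi: mid = (lo+hi+1)//2; if mid*(mid+1)//2 <= n: lo = mid else hi = mid-1
def bsearchB (n lo hi : Int) : Int :=
  if lo < hi then
    let mid := PySem.Int.floordiv (lo + hi + 1) 2
    if PySem.Int.floordiv (mid * (mid + 1)) 2 ≤ n then bsearchB n mid hi
    else bsearchB n lo (mid - 1)
  else lo
termination_by (hi - lo).toNat
decreasing_by
  all_goals
    simp only [PySem.Int.floordiv_eq_ediv_of_pos (show (0:Int) < 2 by omega)] at *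
  all_goals omega

def max_prizes_alt (n : Int) : Int × List Int :=
  if n < 1 then (0, [])
  else
    let k := bsearchB n 0 n
    let prizes := PySem.List.pyRange 1 (k + 1) 1
    let total := PySem.Int.floordiv (k * (k + 1)) 2
    if total < n then
      (k, match prizes.getLast? with
          | some a => prizes.dropLast ++ [a + (n - total)]
          | none => prizes)
    else (k, prizes)

-- ===== PRECONDITION & SPEC =====
def Spec_max_prizes (n : Int) (out : Int × List Int) : Prop := out = max_prizes_alt n
instance (n : Int) (out : Int × List Int) : Decidable (Spec_max_prizes n out) := by unfold Spec_max_prizes; infer_instance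

-- ===== CLAIM (what is proved, stated in full; the proofs are below) =====
def Claim_equal_max_prizes : Prop := ∀ (n : Int), Dom_max_prizes n → Spec_max_prizes n (max_prizes n)

-- ===== LEMMAS AND PROOFS =====

-- A's loop: from an invariant state it reaches the (unique) K with T(K) ≤ n < T(K+1).
theorem loopA_char (n : Int) (k : Nat) (total : Int) (prizes : List Int)
    (h1 : 2 * total = (k : Int) * ((k : Int) + 1)) (h2 : total ≤ n)
    (h3 : prizes = (List.range k).map (fun i => (i : Int) + 1)) :
    ∃ (K : Nat) (t : Int),
      loopA n k total prizes = (K, t, (List.range K).map (fun i => (i : Int) + 1)) ∧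
      2 * t = (K : Int) * ((K : Int) + 1) ∧ t ≤ n ∧ n < t + (K : Int) + 1 := by
  fun_induction loopA n k total prizes with
  | case1 k total prizes hcond ih =>
      obtain ⟨K, t, heq, ha, hb, hc⟩ := ih (by push_cast; nlinarith) hcond
        (by simp [h3, List.range_succ])
      exact ⟨K, t, heq, ha, hb, hc⟩
  | case2 k total prizes hcond =>
      exact ⟨k, total, by simp [h3], h1, h2, by omega⟩

-- B's binary search returns the unique K with K(K+1) ≤ 2n < (K+1)(K+2), given valid bracket.
theorem bsearchB_char (n lo hi : Int) (hle : lo ≤ hi) (h0 : 0 ≤ lo)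
    (hP : lo * (lo + 1) ≤ 2 * n) (hH : 2 * n < (hi + 1) * (hi + 2)) :
    let r := bsearchB n lo hi
    0 ≤ r ∧ r * (r + 1) ≤ 2 * n ∧ 2 * n < (r + 1) * (r + 2) := by
  fun_induction bsearchB n lo hi with
  | case1 lo hi hlt mid hmid ih =>
      -- branch: T(mid) ≤ n, recurse on [mid, hi]
      have hmb : lo < mid ∧ mid ≤ hi := by
        simp only [mid, PySem.Int.floordiv_eq_ediv_of_pos (show (0:Int) < 2 by omega)]
        omega
      have heven : ∃ s, mid * (mid + 1) = 2 * s := (Int.even_mul_succ_self mid).elim (fun s hs => ⟨s, by omega⟩)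
      obtain ⟨s, hs⟩ := heven
      have hmn : mid * (mid + 1) ≤ 2 * n := by
        rw [PySem.Int.floordiv_eq_ediv_of_pos (show (0:Int) < 2 by omega)] at hmid
        omega
      exact ih (by omega) (by omega) hmn hH
  | case2 lo hi hlt mid hmid ih =>
      have hmb : lo < mid ∧ mid ≤ hi := by
        simp only [mid, PySem.Int.floordiv_eq_ediv_of_pos (show (0:Int) < 2 by omega)]
        omega
      have heven : ∃ s, mid * (mid + 1) = 2 * s := (Int.even_mul_succ_self mid).elim (fun s hs => ⟨s, by omega⟩)
      obtain ⟨s, hs⟩ := heven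
      have hmn : 2 * n < mid * (mid + 1) := by
        rw [PySem.Int.floordiv_eq_ediv_of_pos (show (0:Int) < 2 by omega)] at hmid
        omega
      refine ih (by omega) h0 hP ?_
      have : (mid - 1 + 1) * (mid - 1 + 2) = mid * (mid + 1) := by ring
      omega
  | case3 lo hi hlt =>
      exact ⟨h0, hP, by have : lo = hi := le_antisymm hle (by omega); subst this; exact hH⟩

theorem tri_unique (a b n : Int) (ha : 0 ≤ a) (hb : 0 ≤ b)
    (h1 : a * (a + 1) ≤ 2 * n) (h2 : 2 * n < (a + 1) * (a + 2))
    (h3 : b * (b + 1) ≤ 2 * n) (h4 : 2 * n < (b + 1) * (b + 2)) : a = b := by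
  rcases lt_trichotomy a b with h | h | h
  · exfalso; nlinarith
  · exact h
  · exfalso; nlinarith

-- ===== VERDICT (by name: the statement is the Claim_ definition above) =====
theorem max_prizes_spec : Claim_equal_max_prizes := by
  intro n _
  unfold Spec_max_prizes max_prizes max_prizes_alt
  by_cases hn : n < 1
  · have hA : loopA n 0 0 [] = (0, 0, []) := by
      rw [loopA.eq_def]
      simp only [Nat.cast_zero, zero_add]
      rw [if_neg (by omega)]
    simp [hA, hn, show ¬ (0:Int) < n by omega]
  · rw [not_lt] at hn
    obtain ⟨K, t, heq, ha, hb, hc⟩ := loopA_char n 0 0 [] (by norm_num) (by omega) (by simp)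
    have hB := bsearchB_char n 0 n (by omega) le_rfl (by nlinarith) (by nlinarith)
    set r := bsearchB n 0 n with hr
    obtain ⟨hr0, hr1, hr2⟩ := hB
    have hKr : r = (K : Int) := by
      refine tri_unique r (K : Int) n hr0 (by positivity) hr1 hr2 (by nlinarith) (by nlinarith)
    have htot : PySem.Int.floordiv ((K : Int) * ((K : Int) + 1)) 2 = t := by
      rw [PySem.Int.floordiv_eq_ediv_of_pos (show (0:Int) < 2 by omega)]
      omega
    have hlist : PySem.List.pyRange 1 ((K : Int) + 1) 1 = (List.range K).map (fun i => (i : Int) + 1) := by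
      rw [PySem.List.pyRange_one]
      have h4 : ((K : Int) + 1 - 1).toNat = K := by omega
      rw [h4]
      have hmm : ∀ L : List Nat, List.map (fun k : Nat => (1:Int) + k) L
          = List.map (fun i : Int => i + 1) (List.flatMap (fun a : Nat => [(a : Int)]) L) := by
        intro L; induction L with
        | nil => simp
        | cons x xs ih =>
            simp only [List.map_cons, List.flatMap_cons, List.cons_append, List.nil_append]
            rw [← ih]
            simp [add_comm]
      exact hmm (List.range K)
    simp only [heq, if_neg (show ¬ n < 1 by omega), hKr, htot, hlist]
    split <;> rfl
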